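-- pv_equiv track=rewrite | github.com/SO-ia/Course-work | SVM_cluster/data_loader.py | reduce_classes
-- ===== SOURCE A (Python) =====
-- def reduce_classes(labels):
--     """
--     Reduce the number of classes in the 'quality' column to 3 categories:
--     Low (0), Medium (1), and High (2).
--
--     Parameters:
--     - labels (list): The list of original labels from the dataset.
--
--     Returns:
--     - reduced_labels (list): The reduced class labels (0, 1, or 2).
--     """
--     class_map = {}
--     for label in set(labels):
--         if label <= 5:  # Low quality
--             class_map[label] = 0
--         elif label <= 7:  # Medium quality
--             class_map[label] = 1
--         else:  # High quality
--             class_map[label] = 2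
--
--     # Return the new label values based on the class_map
--     return [class_map[label] for label in labels]
-- ===== SOURCE B (Python) =====
-- def reduce_classes(labels):
--     # Rank-based: a label's category is the number of cut points it exceeds
--     # (the two cut points split qualities into Low/Medium/High).
--     cuts = (5, 7)
--     return [sum(c < label for c in cuts) for label in labels]
-- ===== Notes on version B (the rewrite author's own statement) =====
-- stated objective: alternative
-- what changed: Replaces the build-class_map-over-set(labels)-then-look-up (and its threshold branch chain) with a rank computation: each label's category is the count of cut points it exceeds, so no dict, no set and no conditionals.
import Mathlib
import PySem

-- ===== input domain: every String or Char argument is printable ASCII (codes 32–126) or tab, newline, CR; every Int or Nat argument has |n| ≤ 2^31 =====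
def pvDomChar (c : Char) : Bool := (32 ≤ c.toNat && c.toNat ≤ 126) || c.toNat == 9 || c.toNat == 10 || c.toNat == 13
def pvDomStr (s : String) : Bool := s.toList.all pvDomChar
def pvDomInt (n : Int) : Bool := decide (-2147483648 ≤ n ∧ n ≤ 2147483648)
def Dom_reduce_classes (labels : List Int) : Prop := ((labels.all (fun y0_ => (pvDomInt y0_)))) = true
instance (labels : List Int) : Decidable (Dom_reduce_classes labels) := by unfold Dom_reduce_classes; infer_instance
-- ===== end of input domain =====

-- B replaces A's build-class_map-over-set(labels)-then-look-up (threshold branch chain) with a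
-- branch-free rank computation: the category is the count of cut points it exceeds.

-- ===== PORT A =====
-- class_map built by iterating over set(labels); the value inserted depends only on the key,
-- so the (unmodelled) hash-iteration order of the set cannot affect any later lookup.
def reduce_classes (labels : List Int) : List Int :=
  let class_map : PySem.Dict Int Int :=
    (PySem.Set.ofList labels).foldl
      (fun d label =>
        if label ≤ 5 then d.insert label 0
        else if label ≤ 7 then d.insert label 1
        else d.insert label 2)
      PySem.Dict.empty
  -- class_map[label]: get? = none would be Python's KeyError, unreachable since label ∈ set(labels)
  labels.map (fun label => (class_map.get? label).getD 0)

-- ===== PORT B =====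
-- sum(c < label for c in cuts): a fold over the cut-point tuple accumulating the bool-as-int sum
def reduce_classes_alt (labels : List Int) : List Int :=
  let cuts : List Int := [5, 7]
  labels.map (fun label =>
    cuts.foldl (fun acc c => acc + (if c < label then 1 else 0)) 0)

-- ===== PRECONDITION & SPEC =====
def Spec_reduce_classes (labels : List Int) (out : List Int) : Prop := out = reduce_classes_alt labels
instance (labels : List Int) (out : List Int) : Decidable (Spec_reduce_classes labels out) := by unfold Spec_reduce_classes; infer_instance

-- ===== CLAIM =====
def Claim_equal_reduce_classes : Prop := ∀ (labels : List Int), Dom_reduce_classes labels → Spec_reduce_classes labels (reduce_classes labels)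

-- ===== LEMMAS AND PROOFS =====

-- A's class_map lookup characterised: the inserted value depends only on the key, so the last
-- insert at x (if any) stores x's classification; duplicates in s are harmless.
theorem get?_foldA (s : List Int) (d0 : PySem.Dict Int Int) (x : Int) :
    (s.foldl (fun (d : PySem.Dict Int Int) (label : Int) =>
        if label ≤ 5 then d.insert label 0
        else if label ≤ 7 then d.insert label 1
        else d.insert label 2) d0).get? x
    = if x ∈ s then some (if x ≤ 5 then 0 else if x ≤ 7 then 1 else 2) else d0.get? x := by
  induction s generalizing d0 with
  | nil => simp
  | cons a t ih =>
    simp only [List.foldl_cons, ih, List.mem_cons]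
    by_cases hx : x ∈ t
    · simp [hx]
    · by_cases hxa : x = a
      · subst hxa
        simp only [hx, or_false, if_false, if_true]
        split_ifs <;> simp [PySem.Dict.get?_insert_self]
      · simp only [hx, hxa, false_or, if_false]
        split_ifs <;> rw [PySem.Dict.get?_insert_of_ne _ _ hxa]

-- A's per-label lookup equals B's rank (count of cut points exceeded)
theorem lookup_val (labels : List Int) (l : Int) (hl : l ∈ labels) :
    ((((PySem.Set.ofList labels).foldl
        (fun (d : PySem.Dict Int Int) (label : Int) =>
          if label ≤ 5 then d.insert label 0
          else if label ≤ 7 then d.insert label 1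
          else d.insert label 2)
        PySem.Dict.empty).get? l).getD 0)
    = ([5, 7] : List Int).foldl (fun acc c => acc + (if c < l then 1 else 0)) 0 := by
  rw [get?_foldA]
  have hmem : l ∈ PySem.Set.ofList labels := by
    simpa [PySem.Set.mem_ofList] using hl
  simp only [hmem, if_true, Option.getD_some, List.foldl_cons, List.foldl_nil]
  split_ifs <;> omega

-- ===== VERDICT =====
theorem reduce_classes_spec : Claim_equal_reduce_classes := by
  intro labels _
  unfold Spec_reduce_classes reduce_classes reduce_classes_alt
  apply List.map_congr_left
  intro l hl
  exact lookup_val labels l hl
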